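-- pv_equiv track=rewrite | github.com/AdirB100/CS1001.py-HW | HW5/hw5_sol.py | prefix_suffix_overlap_hash1
-- ===== SOURCE A (Python) =====
-- class Dict:
--     def __init__(self, m, hash_func=hash):
--         """ initial hash table, m empty entries """
--         self.table = [ [] for i in range(m)]
--         self.hash_mod = lambda x: hash_func(x) % m
--
--     def __repr__(self):
--         L = [self.table[i] for i in range(len(self.table))]
--         return "".join([str(i) + " " + str(L[i]) + "\n" for i in range(len(self.table))])
--
--     def insert(self, key, value):
--         """ insert key,value into table
--             Allow repetitions of keys """
--         i = self.hash_mod(key) #hash on key only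
--         item = [key, value]    #pack into one item
--         self.table[i].append(item)
--
--     def find(self, key):
--         """ returns ALL values of key as a list, empty list if none """
--         i = self.hash_mod(key)
--         vals_lst = []
--         for x in self.table[i]:
--             if key == x[0]:
--                 vals_lst.append(x[1])
--         return vals_lst
--
-- def prefix_suffix_overlap_hash1(lst, k):
--     sol_lst = []
--     n = len(lst)
--     d = Dict(n)
--     for i in range(n):
--         d.insert(lst[i][:k], i)
--     for j in range(n):
--         vals = d.find(lst[j][-k:])
--         for x in vals:
--             if x != j:
--                 sol_lst.append((x, j))
--     return sol_lst
-- ===== SOURCE B (Python) =====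
-- def prefix_suffix_overlap_hash1(lst, k):
--     n = len(lst)
--     sol_lst = []
--     for j in range(n):
--         for x in range(n):
--             if x != j and lst[x][:k] == lst[j][-k:]:
--                 sol_lst.append((x, j))
--     return sol_lst
-- ===== Notes on version B (the rewrite author's own statement) =====
-- stated objective: simpler
-- what changed: Replaces the custom chained hash table (build buckets, then per-j bucket lookup filtering by key) with a direct all-pairs double loop comparing lst[x][:k] to lst[j][-k:]; output order coincides because bucket matches come back in increasing insertion index.
import Mathlib
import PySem

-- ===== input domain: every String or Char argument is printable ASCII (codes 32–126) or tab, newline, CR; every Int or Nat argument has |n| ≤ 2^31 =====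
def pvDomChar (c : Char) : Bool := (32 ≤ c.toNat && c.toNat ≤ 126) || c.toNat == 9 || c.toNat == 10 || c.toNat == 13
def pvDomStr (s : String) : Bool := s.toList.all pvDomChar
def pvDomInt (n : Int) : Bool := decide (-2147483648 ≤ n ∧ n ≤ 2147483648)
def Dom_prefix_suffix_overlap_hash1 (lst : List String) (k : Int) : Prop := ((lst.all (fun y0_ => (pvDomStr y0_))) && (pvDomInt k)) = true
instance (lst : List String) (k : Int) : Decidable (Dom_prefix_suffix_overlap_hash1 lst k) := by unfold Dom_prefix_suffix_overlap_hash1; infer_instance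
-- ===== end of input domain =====

-- B replaces A's custom chained hash table with a plain all-pairs double loop
-- comparing the same slices; objective: simpler (same output, same order).

-- ===== PORT A =====
-- Stand-in for Python's (unspecified, per-process randomized) str hash: sum of
-- code points. A's return value is independent of the hash function, since
-- find() filters the bucket by full key equality and buckets keep insertion
-- (= increasing index) order; any deterministic hash yields A's exact output.
def pvHash (cs : List Char) : Int := (cs.map (fun c => (c.toNat : Int))).sum

-- bucket index i = hash_func(key) % m  (m > 0 whenever this is evaluated)
def pvBucket (cs : List Char) (m : Nat) : Nat := (PySem.Int.mod (pvHash cs) (m : Int)).toNat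

-- Dict.insert: self.table[i].append([key, value])
def pvInsert (T : List (List (List Char × Int))) (key : List Char) (v : Int) :
    List (List (List Char × Int)) :=
  T.set (pvBucket key T.length) (T.getD (pvBucket key T.length) [] ++ [(key, v)])

-- Dict.find: scan bucket, collect values whose stored key equals `key`
def pvFind (T : List (List (List Char × Int))) (key : List Char) : List Int :=
  (T.getD (pvBucket key T.length) []).foldl
    (fun vals x => if x.1 = key then vals ++ [x.2] else vals) []

def prefix_suffix_overlap_hash1 (lst : List String) (k : Int) : List (Int × Int) :=
  let n := lst.length
  let d0 : List (List (List Char × Int)) := List.replicate n []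
  -- for i in range(n): d.insert(lst[i][:k], i)
  let d := (PySem.List.pyRange 0 n 1).foldl
    (fun T i => pvInsert T (PySem.List.slice (PySem.List.pyGetD lst i "").toList none (some k)) i) d0
  -- for j in range(n): vals = d.find(lst[j][-k:]); for x in vals: if x != j: append (x, j)
  (PySem.List.pyRange 0 n 1).foldl
    (fun sol j =>
      (pvFind d (PySem.List.slice (PySem.List.pyGetD lst j "").toList (some (-k)) none)).foldl
        (fun sol x => if x ≠ j then sol ++ [(x, j)] else sol) sol) []

-- ===== PORT B =====
def prefix_suffix_overlap_hash1_alt (lst : List String) (k : Int) : List (Int × Int) :=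
  let n := lst.length
  (PySem.List.pyRange 0 n 1).foldl
    (fun sol j =>
      (PySem.List.pyRange 0 n 1).foldl
        (fun sol x =>
          if x ≠ j ∧ PySem.List.slice (PySem.List.pyGetD lst x "").toList none (some k)
               = PySem.List.slice (PySem.List.pyGetD lst j "").toList (some (-k)) none
          then sol ++ [(x, j)] else sol) sol) []

-- ===== PRECONDITION & SPEC =====
def Spec_prefix_suffix_overlap_hash1 (lst : List String) (k : Int) (out : List (Int × Int)) : Prop := out = prefix_suffix_overlap_hash1_alt lst k
instance (lst : List String) (k : Int) (out : List (Int × Int)) : Decidable (Spec_prefix_suffix_overlap_hash1 lst k out) := by unfold Spec_prefix_suffix_overlap_hash1; infer_instance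

-- ===== CLAIM (what is proved, stated in full; the proofs are below) =====
def Claim_equal_prefix_suffix_overlap_hash1 : Prop := ∀ (lst : List String) (k : Int), Dom_prefix_suffix_overlap_hash1 lst k → Spec_prefix_suffix_overlap_hash1 lst k (prefix_suffix_overlap_hash1 lst k)

-- ===== LEMMAS AND PROOFS =====

-- inserting preserves the number of buckets
theorem pvInsert_length (T : List (List (List Char × Int))) (key : List Char) (v : Int) :
    (pvInsert T key v).length = T.length := by
  simp [pvInsert]

-- one insert shifts find by the matching-key test (hash-independently)
theorem pvFind_insert (T : List (List (List Char × Int))) (key q : List Char) (v : Int)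
    (hT : 0 < T.length) :
    pvFind (pvInsert T key v) q
      = pvFind T q ++ (if key = q then [v] else []) := by
  have hlt : pvBucket key T.length < T.length := by
    unfold pvBucket
    have := PySem.Int.mod_lt (pvHash key) (b := (T.length : Int)) (by exact_mod_cast hT)
    omega
  unfold pvFind pvInsert
  simp only [List.length_set]
  by_cases hb : pvBucket key T.length = pvBucket q T.length
  · rw [← hb, List.getD, List.getElem?_set_self hlt, Option.getD_some, List.foldl_append]
    by_cases hk : key = q
    · simp [List.getD, hk]
    · simp [List.getD, hk]
  · have hk : key ≠ q := by rintro rfl; exact hb rfl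
    rw [List.getD, List.getElem?_set_ne hb, ← List.getD]
    simp [hk]

-- find over the whole build = the increasing-index filter by key equality
theorem pvFind_build (idxs : List Int) (pref : Int → List Char) (q : List Char)
    (T : List (List (List Char × Int))) (hT : 0 < T.length) :
    pvFind (idxs.foldl (fun T i => pvInsert T (pref i) i) T) q
      = pvFind T q ++ (idxs.filter (fun i => pref i = q)) := by
  induction idxs generalizing T with
  | nil => simp
  | cons i rest ih =>
    simp only [List.foldl_cons, List.filter_cons]
    rw [ih _ (by rw [pvInsert_length]; exact hT), pvFind_insert _ _ _ _ hT]
    by_cases h : pref i = q <;> simp [h]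

theorem pvFind_empty (n : Nat) (q : List Char) :
    pvFind (List.replicate n []) q = [] := by
  unfold pvFind
  rcases Nat.eq_zero_or_pos n with h | h
  · simp [h]
  · have : pvBucket q (List.replicate (α := List (List Char × Int)) n []).length < n := by
      unfold pvBucket
      simp only [List.length_replicate]
      have := PySem.Int.mod_lt (pvHash q) (b := (n : Int)) (by exact_mod_cast h)
      omega
    rw [List.getD, List.getElem?_replicate_of_lt (by simpa using this)]
    simp

-- ===== VERDICT (by name: the statement is the Claim_ definition above) =====
theorem prefix_suffix_overlap_hash1_spec : Claim_equal_prefix_suffix_overlap_hash1 := by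
  intro lst k _
  unfold Spec_prefix_suffix_overlap_hash1 prefix_suffix_overlap_hash1 prefix_suffix_overlap_hash1_alt
  dsimp only
  rcases Nat.eq_zero_or_pos lst.length with hn | hn
  · simp [hn]
  apply PySem.List.foldl_congr_mem
  intro sol j _
  rw [pvFind_build _ _ _ _ (by simpa using hn), pvFind_empty, List.nil_append,
      PySem.List.foldl_append_ite (p := fun x => x ≠ j) (f := fun x => (x, j)),
      PySem.List.foldl_append_ite
        (p := fun x => x ≠ j ∧ PySem.List.slice (PySem.List.pyGetD lst x "").toList none (some k)
            = PySem.List.slice (PySem.List.pyGetD lst j "").toList (some (-k)) none)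
        (f := fun x => (x, j)),
      List.filter_filter]
  congr 2
  apply List.filter_congr
  intro x _
  by_cases h1 : x = j <;> by_cases h2 : PySem.List.slice (PySem.List.pyGetD lst x "").toList none (some k)
      = PySem.List.slice (PySem.List.pyGetD lst j "").toList (some (-k)) none <;> simp [h1, h2]
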